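-- pv_equiv track=rewrite | github.com/adrian0398/Introytaller2018 | Código/Recursión de cola/eliminarcola.py | igual_aux
-- ===== SOURCE A (Python) =====
-- def igual_aux(x,lista,indice,valor,longitud):
--      if indice==longitud:
--           return valor
--      else:
--           if lista[indice]==x:
--                return igual_aux(x,lista,indice+1,True,longitud)
--           else:
--                return igual_aux(x,lista,indice+1,valor,longitud)
-- ===== SOURCE B (Python) =====
-- def igual_aux(x, lista, indice, valor, longitud):
--     result = valor
--     for i in range(indice, longitud):
--         if lista[i] == x:
--             result = True
--     return result
-- ===== Notes on version B (the rewrite author's own statement) =====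
-- stated objective: simpler
-- what changed: Replaces the tail recursion threading an accumulator through call parameters with a single explicit for-loop over range(indice, longitud) that updates a local result flag.
import Mathlib
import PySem

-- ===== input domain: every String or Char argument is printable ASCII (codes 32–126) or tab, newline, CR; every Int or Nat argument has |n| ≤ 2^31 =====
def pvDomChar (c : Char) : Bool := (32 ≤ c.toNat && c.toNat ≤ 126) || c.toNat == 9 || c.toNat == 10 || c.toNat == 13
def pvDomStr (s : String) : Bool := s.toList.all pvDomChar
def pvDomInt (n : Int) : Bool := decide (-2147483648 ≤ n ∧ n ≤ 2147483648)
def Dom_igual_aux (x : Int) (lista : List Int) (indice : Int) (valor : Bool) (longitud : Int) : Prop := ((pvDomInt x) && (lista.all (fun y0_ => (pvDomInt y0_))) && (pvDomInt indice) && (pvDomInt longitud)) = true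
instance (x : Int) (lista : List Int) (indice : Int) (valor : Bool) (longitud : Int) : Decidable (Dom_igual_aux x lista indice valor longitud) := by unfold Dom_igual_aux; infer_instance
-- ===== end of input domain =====

-- B replaces A's accumulator-threading tail recursion with one explicit loop over range(indice, longitud); objective: simpler.


-- ===== PORT A =====
-- A's tail recursion, with fuel (longitud - indice).toNat; inside Pre_ the fuel is
-- exactly the number of recursive steps and the 'none' / fuel-0 defaults are unreachable.
def igualAuxGo (x : Int) (lista : List Int) : Nat → Int → Bool → Int → Bool
  | 0, _, valor, _ => valor
  | fuel+1, indice, valor, longitud =>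
    if indice = longitud then valor
    else
      match PySem.List.pyGet? lista indice with
      | some v =>
        if v = x then igualAuxGo x lista fuel (indice+1) true longitud
        else igualAuxGo x lista fuel (indice+1) valor longitud
      | none => valor  -- IndexError; excluded by Pre_

def igual_aux (x : Int) (lista : List Int) (indice : Int) (valor : Bool) (longitud : Int) : Bool :=
  igualAuxGo x lista (longitud - indice).toNat indice valor longitud

-- ===== PORT B =====
def igual_aux_alt (x : Int) (lista : List Int) (indice : Int) (valor : Bool) (longitud : Int) : Bool :=
  (PySem.List.pyRange indice longitud 1).foldl
    (fun result i =>
      match PySem.List.pyGet? lista i with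
      | some v => if v = x then true else result
      | none => result)  -- IndexError; excluded by Pre_
    valor

-- ===== PRECONDITION & SPEC =====
-- Pre_ is exactly the inputs on which A returns: either the range is empty at once,
-- or every accessed index indice..longitud-1 is a valid Python index of lista.
def Pre_igual_aux (x : Int) (lista : List Int) (indice : Int) (valor : Bool) (longitud : Int) : Prop :=
  indice = longitud ∨ (indice < longitud ∧ -(lista.length : Int) ≤ indice ∧ longitud ≤ lista.length)
instance (x : Int) (lista : List Int) (indice : Int) (valor : Bool) (longitud : Int) : Decidable (Pre_igual_aux x lista indice valor longitud) := by unfold Pre_igual_aux; infer_instance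
def pvWitness_igual_aux : Int × List Int × Int × Bool × Int := (2, [1, 2, 3], 0, false, 3)

def Spec_igual_aux (x : Int) (lista : List Int) (indice : Int) (valor : Bool) (longitud : Int) (out : Bool) : Prop := out = igual_aux_alt x lista indice valor longitud
instance (x : Int) (lista : List Int) (indice : Int) (valor : Bool) (longitud : Int) (out : Bool) : Decidable (Spec_igual_aux x lista indice valor longitud out) := by unfold Spec_igual_aux; infer_instance

-- ===== CLAIM (what is proved, stated in full; the proofs are below) =====
def Claim_equal_igual_aux : Prop := ∀ (x : Int) (lista : List Int) (indice : Int) (valor : Bool) (longitud : Int), Dom_igual_aux x lista indice valor longitud → Pre_igual_aux x lista indice valor longitud → Spec_igual_aux x lista indice valor longitud (igual_aux x lista indice valor longitud)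

-- ===== LEMMAS AND PROOFS =====
lemma igualAuxGo_eq_foldl (x : Int) (lista : List Int) (longitud : Int) :
    ∀ (fuel : Nat) (indice : Int) (valor : Bool),
      (longitud - indice).toNat = fuel →
      Pre_igual_aux x lista indice valor longitud →
      igualAuxGo x lista fuel indice valor longitud =
        igual_aux_alt x lista indice valor longitud := by
  intro fuel
  induction fuel with
  | zero =>
    intro indice valor hf hpre
    have hle : longitud ≤ indice := by omega
    simp [igualAuxGo, igual_aux_alt, PySem.List.pyRange_one_eq_nil hle]
  | succ f ih =>
    intro indice valor hf hpre
    rcases hpre with heq | ⟨hlt, hlo, hhi⟩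
    · subst heq
      simp [igualAuxGo, igual_aux_alt, PySem.List.pyRange_one_eq_nil le_rfl]
    · have hrange : PySem.Raise.InRange lista.length indice := by
        constructor <;> omega
      obtain ⟨v, hv⟩ : ∃ v, PySem.List.pyGet? lista indice = some v := by
        cases h : PySem.List.pyGet? lista indice with
        | none => exact absurd ((PySem.List.pyGet?_eq_none_iff lista indice).mp h) (fun hn => hn hrange)
        | some v => exact ⟨v, rfl⟩
      have hpre' : ∀ w : Bool, Pre_igual_aux x lista (indice + 1) w longitud := by
        intro w
        by_cases h1 : indice + 1 = longitud
        · exact Or.inl h1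
        · exact Or.inr ⟨by omega, by omega, hhi⟩
      have hf' : (longitud - (indice + 1)).toNat = f := by omega
      have hcons := PySem.List.pyRange_one_cons (a := indice) (b := longitud) hlt
      simp only [igualAuxGo, if_neg (by omega : ¬ indice = longitud), hv]
      rw [ih (indice + 1) true hf' (hpre' true), ih (indice + 1) valor hf' (hpre' valor)]
      simp only [igual_aux_alt, hcons, List.foldl_cons, hv]
      by_cases hvx : v = x <;> simp [hvx]

theorem igual_aux_spec : Claim_equal_igual_aux := by
  intro x lista indice valor longitud _ hpre
  unfold Spec_igual_aux igual_aux
  exact igualAuxGo_eq_foldl x lista longitud _ indice valor rfl hpre
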